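-- pv_equiv track=rewrite | github.com/MukundaKatta/SwarmKit | src/swarmkit/utils.py | approval_vote
-- ===== SOURCE A (Python) =====
-- def approval_vote(approvals: list[set[str]], options: list[str]) -> str:
--     """Each agent approves a subset of options; the most-approved wins."""
--     counts: dict[str, int] = {o: 0 for o in options}
--     for approved in approvals:
--         for option in approved:
--             if option in counts:
--                 counts[option] += 1
--     best = max(counts, key=lambda o: counts[o])
--     return best
-- ===== SOURCE B (Python) =====
-- def approval_vote(approvals: list[set[str]], options: list[str]) -> str:
--     """Each agent approves a subset of options; the most-approved wins."""
--     return max(options, key=lambda o: sum(o in approved for approved in approvals))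
-- ===== Notes on version B (the rewrite author's own statement) =====
-- stated objective: simpler
-- what changed: Drops the counts dict entirely: the winner is computed as max(options, key=membership-count), scanning the approval sets per option instead of building and then scanning a count table; first-maximal tie-breaking over options order is preserved.
-- outside the precondition, e.g. on approval_vote([], []): A raises ValueError, B raises ValueError
import Mathlib
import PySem

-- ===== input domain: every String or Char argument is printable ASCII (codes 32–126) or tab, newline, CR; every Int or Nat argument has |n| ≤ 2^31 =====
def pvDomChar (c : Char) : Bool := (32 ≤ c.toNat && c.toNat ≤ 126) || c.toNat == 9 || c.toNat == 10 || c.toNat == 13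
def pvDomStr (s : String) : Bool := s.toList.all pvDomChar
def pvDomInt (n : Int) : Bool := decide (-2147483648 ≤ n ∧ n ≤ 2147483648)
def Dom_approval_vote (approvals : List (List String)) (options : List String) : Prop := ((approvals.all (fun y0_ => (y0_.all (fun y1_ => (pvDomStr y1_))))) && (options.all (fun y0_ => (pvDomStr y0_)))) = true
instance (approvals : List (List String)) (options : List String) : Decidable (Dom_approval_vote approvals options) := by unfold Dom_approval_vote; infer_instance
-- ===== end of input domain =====

-- B drops the explicit counts dict and returns max(options, key = number of approval sets containing the option);
-- tie-breaking (first maximal in options order) is unchanged.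

-- ===== PORT A =====
def approval_vote (approvals : List (List String)) (options : List String) : String :=
  -- counts = {o: 0 for o in options}
  let counts0 : PySem.Dict String Int :=
    options.foldl (fun d o => d.insert o 0) (PySem.Dict.mk [])
  -- for approved in approvals: for option in approved: if option in counts: counts[option] += 1
  let counts : PySem.Dict String Int :=
    approvals.foldl (fun d approved =>
      approved.foldl (fun d option =>
        if d.contains option then d.modify option 0 (fun v => v + 1) else d) d) counts0
  -- best = max(counts, key=lambda o: counts[o])   (ValueError on empty dict is excluded by Pre_)
  match PySem.List.max? counts.keys (fun o => counts.getD o 0) with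
  | some best => best
  | none => ""

-- ===== PORT B =====
def approval_vote_alt (approvals : List (List String)) (options : List String) : String :=
  -- max(options, key=lambda o: sum(o in approved for approved in approvals))
  match PySem.List.max? options (fun o => ((approvals.countP (fun a => a.contains o) : Nat) : Int)) with
  | some best => best
  | none => ""

-- ===== PRECONDITION & SPEC =====
-- Pre_ excludes empty options, on which Python's max raises ValueError (in both A and B), and approval lists
-- with duplicate entries, whose Lean list form does not represent any Python set[str] input.
def Pre_approval_vote (approvals : List (List String)) (options : List String) : Prop :=
  options ≠ [] ∧ ∀ a ∈ approvals, a.Nodup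
instance (approvals : List (List String)) (options : List String) : Decidable (Pre_approval_vote approvals options) := by unfold Pre_approval_vote; infer_instance
def pvWitness_approval_vote : List (List String) × List String := ([["x", "y"], ["y"]], ["x", "y", "z"])

def Spec_approval_vote (approvals : List (List String)) (options : List String) (out : String) : Prop := out = approval_vote_alt approvals options
instance (approvals : List (List String)) (options : List String) (out : String) : Decidable (Spec_approval_vote approvals options out) := by unfold Spec_approval_vote; infer_instance

-- ===== CLAIM (what is proved, stated in full; the proofs are below) =====
def Claim_equal_approval_vote : Prop := ∀ (approvals : List (List String)) (options : List String), Dom_approval_vote approvals options → Pre_approval_vote approvals options → Spec_approval_vote approvals options (approval_vote approvals options)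

-- ===== LEMMAS AND PROOFS =====

-- the step of Python's max(xs, key=f) (first maximal element), as in PySem.List.max?
def maxStep (f : String → Int) (acc : Option String) (x : String) : Option String :=
  match acc with
  | none => some x
  | some m => if f m < f x then some x else some m

theorem max?_eq_foldl_maxStep (f : String → Int) (xs : List String) :
    PySem.List.max? xs f = xs.foldl (maxStep f) none := by
  unfold PySem.List.max?
  apply PySem.List.foldl_congr_mem
  intro acc x _
  cases acc <;> rfl

theorem foldl_maxStep_some_mono (f : String → Int) (s : List String) (m : String) :
    ∃ m', s.foldl (maxStep f) (some m) = some m' ∧ f m ≤ f m' := by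
  induction s generalizing m with
  | nil => exact ⟨m, rfl, le_refl _⟩
  | cons y t ih =>
    simp only [List.foldl_cons, maxStep]
    split
    · obtain ⟨m', h1, h2⟩ := ih y
      exact ⟨m', h1, le_of_lt (lt_of_lt_of_le (by assumption) h2)⟩
    · exact ih m

theorem foldl_maxStep_mem_le (f : String → Int) (s : List String) (acc : Option String)
    (x : String) (hx : x ∈ s) :
    ∃ m', s.foldl (maxStep f) acc = some m' ∧ f x ≤ f m' := by
  induction s generalizing acc with
  | nil => cases hx
  | cons y t ih =>
    rcases List.mem_cons.mp hx with rfl | hxt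
    · -- after processing x itself, the accumulator is some m₂ with f x ≤ f m₂
      have : ∃ m₂, maxStep f acc x = some m₂ ∧ f x ≤ f m₂ := by
        cases acc with
        | none => exact ⟨x, rfl, le_refl _⟩
        | some m =>
          simp only [maxStep]
          split
          · exact ⟨x, rfl, le_refl _⟩
          · exact ⟨m, rfl, le_of_not_gt (by assumption)⟩
      obtain ⟨m₂, h1, h2⟩ := this
      simp only [List.foldl_cons, h1]
      obtain ⟨m', h3, h4⟩ := foldl_maxStep_some_mono f t m₂
      exact ⟨m', h3, le_trans h2 h4⟩
    · simpa using ih (maxStep f acc y) hxt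

-- folding max over the ordered dedup (PySem.Set.ofList) gives the same result as over the raw list
theorem foldl_maxStep_ofList_aux (f : String → Int) (xs s : List String) (acc : Option String) :
    (List.foldl PySem.Set.add s xs).foldl (maxStep f) acc
      = xs.foldl (maxStep f) (s.foldl (maxStep f) acc) := by
  induction xs generalizing s with
  | nil => rfl
  | cons x t ih =>
    simp only [List.foldl_cons]
    by_cases hmem : x ∈ s
    · have hc : PySem.Set.add s x = s := by
        simp [PySem.Set.add, List.contains_eq_mem, hmem]
      rw [hc, ih s]
      obtain ⟨m', h1, h2⟩ := foldl_maxStep_mem_le f s acc x hmem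
      have : maxStep f (s.foldl (maxStep f) acc) x = s.foldl (maxStep f) acc := by
        rw [h1]; simp [maxStep, not_lt.mpr h2]
      rw [this]
    · have hc : PySem.Set.add s x = s ++ [x] := by
        simp [PySem.Set.add, List.contains_eq_mem, hmem]
      rw [hc, ih (s ++ [x])]
      simp [List.foldl_append]

theorem max?_ofList (f : String → Int) (xs : List String) :
    PySem.List.max? (PySem.Set.ofList xs) f = PySem.List.max? xs f := by
  rw [max?_eq_foldl_maxStep, max?_eq_foldl_maxStep, PySem.Set.ofList,
    foldl_maxStep_ofList_aux f xs PySem.Set.empty none]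
  rfl

-- max? only looks at the key values of list members
theorem max?_congr_mem (f g : String → Int) (xs : List String)
    (h : ∀ x ∈ xs, f x = g x) : PySem.List.max? xs f = PySem.List.max? xs g := by
  rw [max?_eq_foldl_maxStep, max?_eq_foldl_maxStep]
  have main : ∀ (ys : List String) (acc : Option String),
      (∀ x ∈ ys, f x = g x) →
      (acc = none ∨ ∃ m, acc = some m ∧ f m = g m) →
      ys.foldl (maxStep f) acc = ys.foldl (maxStep g) acc := by
    intro ys
    induction ys with
    | nil => intro acc _ _; rfl
    | cons y t ih =>
      intro acc hkeys hacc
      have hy : f y = g y := hkeys y List.mem_cons_self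
      have hstep : maxStep f acc y = maxStep g acc y ∧
          (maxStep f acc y = none ∨ ∃ m, maxStep f acc y = some m ∧ f m = g m) := by
        rcases hacc with rfl | ⟨m, rfl, hm⟩
        · exact ⟨rfl, Or.inr ⟨y, rfl, hy⟩⟩
        · have h1 : maxStep f (some m) y = maxStep g (some m) y := by
            simp only [maxStep, hm, hy]
          refine ⟨h1, ?_⟩
          simp only [maxStep]
          split
          · exact Or.inr ⟨y, rfl, hy⟩
          · exact Or.inr ⟨m, rfl, hm⟩
      simp only [List.foldl_cons]
      rw [ih (maxStep f acc y) (fun x hx => hkeys x (List.mem_cons_of_mem y hx)) hstep.2,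
        hstep.1]
  exact main xs none h (Or.inl rfl)

-- lookup in a dict whose items are ks.map (k, f k)
theorem find?_map_pair (ks : List String) (f : String → Int) (o : String) (ho : o ∈ ks) :
    List.find? (fun p => p.1 == o) (ks.map (fun k => (k, f k))) = some (o, f o) := by
  induction ks with
  | nil => cases ho
  | cons k t ih =>
    by_cases hk : k = o
    · subst hk; simp
    · have : o ∈ t := by
        rcases List.mem_cons.mp ho with rfl | h
        · exact absurd rfl hk
        · exact h
      simp [hk, ih this]

-- the dict comprehension {o: 0 for o in options} builds the ordered dedup of options with value 0
theorem init_dict_eq (options s : List String) :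
    (options.foldl (fun d o => d.insert o (0:Int)) (PySem.Dict.mk (s.map (fun k => (k, (0:Int))))))
      = PySem.Dict.mk ((List.foldl PySem.Set.add s options).map (fun k => (k, (0:Int)))) := by
  induction options generalizing s with
  | nil => rfl
  | cons o t ih =>
    simp only [List.foldl_cons]
    by_cases hmem : o ∈ s
    · have hadd : PySem.Set.add s o = s := by
        simp [PySem.Set.add, List.contains_eq_mem, hmem]
      have hins : (PySem.Dict.mk (s.map (fun k => (k, (0:Int))))).insert o 0
          = PySem.Dict.mk (s.map (fun k => (k, (0:Int)))) := by
        have hcon : (PySem.Dict.mk (s.map (fun k => (k, (0:Int))))).contains o = true := by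
          simp [PySem.Dict.contains, List.any_map, List.any_eq_true]
          exact hmem
        simp only [PySem.Dict.insert, hcon, if_pos, List.map_map]
        congr 1
        apply List.map_congr_left
        intro k _
        by_cases hko : k = o <;> simp [Function.comp, hko]
      rw [hins, ih s, hadd]
    · have hadd : PySem.Set.add s o = s ++ [o] := by
        simp [PySem.Set.add, List.contains_eq_mem, hmem]
      have hcon : (PySem.Dict.mk (s.map (fun k => (k, (0:Int))))).contains o = false := by
        simp [PySem.Dict.contains, List.any_map, Function.comp]
        intro k hk
        exact fun h => hmem (h ▸ hk)
      have hins : (PySem.Dict.mk (s.map (fun k => (k, (0:Int))))).insert o 0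
          = PySem.Dict.mk ((s ++ [o]).map (fun k => (k, (0:Int)))) := by
        simp [PySem.Dict.insert, hcon]
      rw [hins, ih (s ++ [o]), hadd]

-- one inner loop: counting a duplicate-free approved list adds 1 to every key it contains
theorem inner_loop_eq (approved : List String) (hnd : approved.Nodup)
    (ks : List String) (f : String → Int) :
    (approved.foldl (fun d option =>
        if d.contains option then d.modify option 0 (fun v => v + 1) else d)
      (PySem.Dict.mk (ks.map (fun k => (k, f k)))))
      = PySem.Dict.mk (ks.map (fun k => (k, f k + if approved.contains k then 1 else 0))) := by
  induction approved generalizing f with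
  | nil => simp
  | cons a t ih =>
    have hat : a ∉ t := (List.nodup_cons.mp hnd).1
    have hndt : t.Nodup := (List.nodup_cons.mp hnd).2
    simp only [List.foldl_cons]
    by_cases hmem : a ∈ ks
    · have hcon : (PySem.Dict.mk (ks.map (fun k => (k, f k)))).contains a = true := by
        simp [PySem.Dict.contains, List.any_map, Function.comp]
        exact hmem
      have hget : (PySem.Dict.mk (ks.map (fun k => (k, f k)))).getD a 0 = f a := by
        simp [PySem.Dict.getD, PySem.Dict.get?, find?_map_pair ks f a hmem]
      have hmod : (PySem.Dict.mk (ks.map (fun k => (k, f k)))).modify a 0 (fun v => v + 1)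
          = PySem.Dict.mk (ks.map (fun k => (k, if k == a then f a + 1 else f k))) := by
        simp only [PySem.Dict.modify, hget, PySem.Dict.insert, hcon, if_pos, List.map_map]
        congr 1
        apply List.map_congr_left
        intro k _
        by_cases hka : k = a <;> simp [Function.comp, hka]
      rw [if_pos hcon, hmod, ih hndt]
      congr 1
      apply List.map_congr_left
      intro k _
      by_cases hka : k = a
      · subst hka
        simp [List.contains_eq_mem, hat]
      · simp [hka, List.contains_eq_mem]
    · have hcon : (PySem.Dict.mk (ks.map (fun k => (k, f k)))).contains a = false := by
        simp [PySem.Dict.contains, List.any_map, Function.comp]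
        intro k hk
        exact fun h => hmem (h ▸ hk)
      rw [if_neg (by simp [hcon]), ih hndt]
      congr 1
      apply List.map_congr_left
      intro k hk
      have hka : ¬ (k = a) := fun h => hmem (h ▸ hk)
      simp [List.contains_eq_mem, hka]

-- the whole counting loop: every key ends at its membership count over approvals
theorem outer_loop_eq (approvals : List (List String)) (h : ∀ a ∈ approvals, a.Nodup)
    (ks : List String) (f : String → Int) :
    (approvals.foldl (fun d approved =>
        approved.foldl (fun d option =>
          if d.contains option then d.modify option 0 (fun v => v + 1) else d) d)
      (PySem.Dict.mk (ks.map (fun k => (k, f k)))))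
      = PySem.Dict.mk (ks.map (fun k =>
          (k, f k + ((approvals.countP (fun a => a.contains k) : Nat) : Int)))) := by
  induction approvals generalizing f with
  | nil => simp
  | cons a t ih =>
    simp only [List.foldl_cons]
    rw [inner_loop_eq a (h a List.mem_cons_self) ks f,
      ih (fun x hx => h x (List.mem_cons_of_mem a hx))]
    congr 1
    apply List.map_congr_left
    intro k _
    simp only [List.countP_cons]
    by_cases hm : a.contains k = true
    · simp only [hm, if_pos]
      push_cast
      ring
    · simp only [hm, Bool.false_eq_true, if_false]
      push_cast
      ring

-- ===== VERDICT (by name: the statement is the Claim_ definition above) =====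
theorem approval_vote_spec : Claim_equal_approval_vote := by
  intro approvals options _ hpre
  obtain ⟨_, hnodup⟩ := hpre
  unfold Spec_approval_vote approval_vote approval_vote_alt
  set S := PySem.Set.ofList options with hSdef
  set cnt : String → Int := fun k => ((approvals.countP (fun a => a.contains k) : Nat) : Int)
    with hcnt
  -- the counting loops build exactly the dict (ordered dedup of options) ↦ (membership count)
  have hdict : (approvals.foldl (fun d approved =>
        approved.foldl (fun d option =>
          if d.contains option then d.modify option 0 (fun v => v + 1) else d) d)
      (options.foldl (fun d o => d.insert o 0) (PySem.Dict.mk [])))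
      = PySem.Dict.mk (S.map (fun k => (k, cnt k))) := by
    have h0 : (PySem.Dict.mk ([] : List (String × Int)))
        = PySem.Dict.mk (([] : List String).map (fun k => (k, (0:Int)))) := rfl
    rw [h0, init_dict_eq options []]
    have hS : List.foldl PySem.Set.add [] options = S := rfl
    rw [hS, outer_loop_eq approvals hnodup S (fun _ => 0)]
    congr 1
    apply List.map_congr_left; intro k _; simp [hcnt]
  have hkeys : (PySem.Dict.mk (S.map (fun k => (k, cnt k)))).keys = S := by
    simp [PySem.Dict.keys, List.map_map, Function.comp_def]
  have hgetD : ∀ o ∈ S,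
      (PySem.Dict.mk (S.map (fun k => (k, cnt k)))).getD o 0 = cnt o := by
    intro o ho
    simp [PySem.Dict.getD, PySem.Dict.get?, find?_map_pair S cnt o ho]
  simp only [hdict, hkeys]
  rw [max?_congr_mem _ cnt S hgetD, hSdef, max?_ofList cnt options]
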